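-- pv_equiv track=rewrite | github.com/dahn-zk/zsh-jupyter-kernel | zsh_jupyter_kernel/fun.py | find_word_at_pos
-- ===== SOURCE A (Python) =====
-- def find_word_at_pos(text : str, pos : int) -> str:
--     cw = ""
--     p = 0
--     ic = '\n\t"' + r" |;,!@#$()<>/\'`~{}[]=+&^"
--
--     while p < pos:
--         c = text[p]
--         if c in ic:
--             cw = ""
--         else:
--             cw += c
--         p += 1
--
--     while p < len(text):
--         c = text[p]
--         if c in ic:
--             break
--         else:
--             cw += c
--         p += 1
--
--     return cw
-- ===== SOURCE B (Python) =====
-- IC = '\n\t"' + r" |;,!@#$()<>/\'`~{}[]=+&^"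
--
-- def find_word_at_pos(text: str, pos: int) -> str:
--     # Anchor at pos (clamped into [0, len(text)]), then scan backward to the
--     # word start and forward to the word end: O(word length) instead of O(pos).
--     start = min(max(pos, 0), len(text))
--     begin = start
--     while begin > 0 and text[begin - 1] not in IC:
--         begin -= 1
--     end = start
--     for c in text[start:]:
--         if c in IC:
--             break
--         end += 1
--     return text[begin:end]
-- ===== Notes on version B (the rewrite author's own statement) =====
-- stated objective: faster
-- what changed: Instead of scanning the whole prefix text[0:pos] while rebuilding/resetting an accumulator, B anchors at pos and scans backward to the word start and forward to the word end, then returns one slice.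
import Mathlib
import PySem

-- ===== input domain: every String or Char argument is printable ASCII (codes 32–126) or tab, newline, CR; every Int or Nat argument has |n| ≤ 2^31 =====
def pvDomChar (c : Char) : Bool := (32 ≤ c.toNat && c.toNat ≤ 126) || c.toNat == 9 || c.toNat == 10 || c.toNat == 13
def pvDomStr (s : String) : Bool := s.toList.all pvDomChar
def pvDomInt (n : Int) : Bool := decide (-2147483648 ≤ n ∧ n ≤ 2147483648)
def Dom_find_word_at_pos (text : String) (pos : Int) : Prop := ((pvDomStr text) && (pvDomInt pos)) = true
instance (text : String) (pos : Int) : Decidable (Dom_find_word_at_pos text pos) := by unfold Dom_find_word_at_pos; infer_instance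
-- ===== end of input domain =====

-- B anchors at pos and scans backward/forward over the containing word only, instead of A's scan of the whole prefix text[0:pos].

-- ===== PORT A =====
-- the delimiter characters ic = '\n\t"' + r" |;,!@#$()<>/\'`~{}[]=+&^"  (raw string: backslash and quote are two chars)
def fwIC : List Char := "\n\t\" |;,!@#$()<>/\\'`~{}[]=+&^".toList

-- body of A's first loop: on a delimiter reset cw to "", otherwise append c
def fwaStep (cw : List Char) (c : Char) : List Char := if c ∈ fwIC then [] else cw ++ [c]

-- A's second loop: break on a delimiter, otherwise append c and continue
def fwaLoop2 (cw : List Char) : List Char → List Char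
  | [] => cw
  | c :: rest => if c ∈ fwIC then cw else fwaLoop2 (cw ++ [c]) rest

-- A's first loop reads text[p] for p = 0 .. pos-1 (none if pos ≤ 0); Pre_ guarantees pos ≤ len(text),
-- so those characters are exactly text.toList.take pos.toNat; the second loop starts at p = pos.toNat.
def find_word_at_pos (text : String) (pos : Int) : String :=
  String.mk (fwaLoop2 ((text.toList.take pos.toNat).foldl fwaStep []) (text.toList.drop pos.toNat))

-- ===== PORT B =====
-- B's backward loop: while begin > 0 and text[begin-1] not in IC: begin -= 1
def fwbBack (cs : List Char) : Nat → Nat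
  | 0 => 0
  | b + 1 => if cs.getD b default ∈ fwIC then b + 1 else fwbBack cs b

-- B's forward loop: for c in text[start:]: break on a delimiter, else end += 1
def fwbFwd : List Char → Nat → Nat
  | [], e => e
  | c :: rest, e => if c ∈ fwIC then e else fwbFwd rest (e + 1)

-- start = min(max(pos, 0), len(text)); return text[begin:end]
def find_word_at_pos_alt (text : String) (pos : Int) : String :=
  String.mk (((text.toList.drop (fwbBack text.toList (min (max pos 0).toNat text.toList.length))).take
    (fwbFwd (text.toList.drop (min (max pos 0).toNat text.toList.length)) (min (max pos 0).toNat text.toList.length)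
      - fwbBack text.toList (min (max pos 0).toNat text.toList.length))))

-- ===== PRECONDITION & SPEC =====
-- A indexes text[p] for every p < pos, so it raises IndexError exactly when pos > len(text); those inputs are excluded.
def Pre_find_word_at_pos (text : String) (pos : Int) : Prop := pos ≤ (text.toList.length : Int)
instance (text : String) (pos : Int) : Decidable (Pre_find_word_at_pos text pos) := by unfold Pre_find_word_at_pos; infer_instance

def pvWitness_find_word_at_pos : String × Int := ("hello wor,ld", 8)

def Spec_find_word_at_pos (text : String) (pos : Int) (out : String) : Prop := out = find_word_at_pos_alt text pos
instance (text : String) (pos : Int) (out : String) : Decidable (Spec_find_word_at_pos text pos out) := by unfold Spec_find_word_at_pos; infer_instance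

-- ===== CLAIM (what is proved, stated in full; the proofs are below) =====
def Claim_equal_find_word_at_pos : Prop := ∀ (text : String) (pos : Int), Dom_find_word_at_pos text pos → Pre_find_word_at_pos text pos → Spec_find_word_at_pos text pos (find_word_at_pos text pos)

-- ===== LEMMAS AND PROOFS =====

-- A's first loop computes the suffix of the processed prefix after its last delimiter
lemma fwa_foldl_eq (l : List Char) :
    l.foldl fwaStep [] = (l.reverse.takeWhile (· ∉ fwIC)).reverse := by
  induction l using List.reverseRecOn with
  | nil => simp
  | append_singleton xs c ih =>
      rw [List.foldl_append, List.foldl_cons, List.foldl_nil, ih, List.reverse_append,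
        List.reverse_singleton, List.singleton_append, List.takeWhile_cons, fwaStep]
      by_cases h : c ∈ fwIC <;> simp [h]

lemma fwbBack_le (cs : List Char) (n : Nat) : fwbBack cs n ≤ n := by
  induction n with
  | zero => simp [fwbBack]
  | succ b ih =>
      simp only [fwbBack]
      split <;> omega

-- B's backward scan finds the word start: dropping it from the prefix gives the suffix after the last delimiter
lemma fwbBack_drop (cs : List Char) (n : Nat) (hn : n ≤ cs.length) :
    (cs.take n).drop (fwbBack cs n) = ((cs.take n).reverse.takeWhile (· ∉ fwIC)).reverse := by
  induction n with
  | zero => simp [fwbBack]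
  | succ b ih =>
      have hb : b < cs.length := by omega
      have htake : cs.take (b + 1) = cs.take b ++ [cs[b]] := by
        rw [List.take_add_one]
        simp [List.getElem?_eq_getElem hb]
      have hget : cs.getD b default = cs[b] := by
        simp [List.getD, List.getElem?_eq_getElem hb]
      have hlen : (cs.take b).length = b := by simp [Nat.min_eq_left (le_of_lt hb)]
      simp only [fwbBack, hget]
      rw [htake, List.reverse_append, List.reverse_singleton, List.singleton_append,
        List.takeWhile_cons]
      by_cases h : cs[b] ∈ fwIC
      · rw [if_pos h, List.drop_of_length_le (by simp [hlen])]
        simp [h]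
      · rw [if_neg h,
          List.drop_append_of_le_length (by rw [hlen]; exact fwbBack_le cs b),
          if_pos (by simp [h]), List.reverse_cons, ih (by omega)]

-- B's forward scan advances end by exactly the delimiter-free prefix of the rest
lemma fwbFwd_eq (l : List Char) (e : Nat) :
    fwbFwd l e = e + (l.takeWhile (· ∉ fwIC)).length := by
  induction l generalizing e with
  | nil => simp [fwbFwd]
  | cons c rest ih =>
      rw [fwbFwd, List.takeWhile_cons]
      by_cases h : c ∈ fwIC
      · simp [h]
      · simp [h, ih]
        omega

-- A's second loop appends the delimiter-free prefix of the rest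
lemma fwaLoop2_eq (l cw : List Char) : fwaLoop2 cw l = cw ++ l.takeWhile (· ∉ fwIC) := by
  induction l generalizing cw with
  | nil => simp [fwaLoop2]
  | cons c rest ih =>
      rw [fwaLoop2, List.takeWhile_cons]
      by_cases h : c ∈ fwIC <;> simp [h, ih]

lemma take_takeWhile_length {p : Char → Bool} (l : List Char) :
    l.take (l.takeWhile p).length = l.takeWhile p := by
  induction l with
  | nil => simp
  | cons c rest ih =>
      by_cases h : p c <;> simp [List.takeWhile_cons, h, ih]

-- ===== VERDICT (by name: the statement is the Claim_ definition above) =====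
theorem find_word_at_pos_spec : Claim_equal_find_word_at_pos := by
  intro text pos _ hpre
  unfold Spec_find_word_at_pos find_word_at_pos find_word_at_pos_alt
  have hpre' : pos ≤ (text.toList.length : Int) := hpre
  set cs := text.toList with hcs
  have hn : pos.toNat ≤ cs.length := by omega
  have hstart : min (max pos 0).toNat cs.length = pos.toNat := by omega
  rw [hstart]
  set n := pos.toNat
  set b := fwbBack cs n with hbdef
  have hble : b ≤ n := fwbBack_le cs n
  rw [fwaLoop2_eq, fwa_foldl_eq, fwbFwd_eq, ← fwbBack_drop cs n hn, ← hbdef]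
  set t := ((cs.drop n).takeWhile (· ∉ fwIC)).length with htdef
  have hsplit : n + t - b = (n - b) + t := by omega
  have h2 : b + (n - b) = n := by omega
  have e2 : (cs.drop n).takeWhile (· ∉ fwIC) = ((cs.drop b).drop (n - b)).take t := by
    rw [List.drop_drop, h2, htdef]
    exact (take_takeWhile_length _).symm
  rw [hsplit, List.take_add, List.drop_take, e2]
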